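-- pv_equiv track=rewrite | github.com/MarkAStevens04/Duty_Solver | main.py | order_days
-- ===== SOURCE A (Python) =====
-- def calc_difficulty(availability, index):
--     # Calculates the difficulty of a given day!
--     # small difficulty = very difficult
--     difficulty = 0
--     diff2 = 0
--     for p in range(len(availability)):
--         if availability[p][index] != 0:
--             difficulty += 1
--             # days are more difficult if the only people who are available are people who don't have a lot of availability
--             # diff2 tracks how many easy people are available that day
--             diff2 += p
--
--
--
--
--     return difficulty, diff2
--
-- def order_days(availability):
--     # orders days based on their "difficulty".
--     # difficult days come first, easy days come last.
--     # Difficult days have very little availability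
--     # Easy have have a lot of availability.
--     # Solving easy days first allows us to do the hard part as few times as possible.
--     # Otherwise, our algorithm would explore a lot of solutions, all which fail
--     # for the same reason.
--
--     diff_tuples = []
--     orig_mapping = {}
--     # orig_mapping goes {new_index: previous_index}
--     # think "the row at index "key" came from the row at index "value"
--     # dict_mapping goes {new_index: previous_index}
--
--     # d is day index
--     for d in range(len(availability[0])):
--         # small difficulty = very difficult
--         difficulty, diff2 = calc_difficulty(availability, d)
--         diff_tuples.append((difficulty, diff2, d))
--
--     diff_tuples.sort()
--     for t in range(len(diff_tuples)):
--         orig_mapping[t] = diff_tuples[t][2]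
--
--     # reconstruct the availability
--     new_availability = []
--     for p in range(len(availability)):
--         new_availability.append([])
--
--     for d in range(len(availability[0])):
--         for p in range(len(availability)):
--             orig_index = orig_mapping[d]
--             new_availability[p].append(availability[p][orig_index])
--
--     return new_availability, orig_mapping
-- ===== SOURCE B (Python) =====
-- def order_days(availability):
--     # Selection strategy: no sort call -- repeatedly extract the minimum-key day
--     # (key = (availability count, sum of available person indices, day index),
--     # distinct because the day index breaks all ties), then rebuild each row by
--     # reading the chosen days in that order.
--     n_days = len(availability[0])
--     keys = []
--     for d in range(n_days):
--         difficulty = 0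
--         diff2 = 0
--         for p, row in enumerate(availability):
--             if row[d] != 0:
--                 difficulty += 1
--                 diff2 += p
--         keys.append((difficulty, diff2, d))
--     chosen = []
--     while keys:
--         m = min(keys)
--         chosen.append(m)
--         keys.remove(m)
--     order = [m[2] for m in chosen]
--     orig_mapping = dict(enumerate(order))
--     new_availability = [[row[d] for d in order] for row in availability]
--     return new_availability, orig_mapping
-- ===== Notes on version B (the rewrite author's own statement) =====
-- stated objective: alternative
-- what changed: B never calls sort: it repeatedly extracts the minimum-key day (selection) from the key list, whose day index makes every key distinct, and rebuilds each row directly by reading the chosen days in order, instead of A's list.sort() on key tuples followed by dict-driven per-column append loops into pre-created empty rows.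
-- outside the precondition, e.g. on order_days([]): A raises IndexError, B raises IndexError
import Mathlib
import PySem

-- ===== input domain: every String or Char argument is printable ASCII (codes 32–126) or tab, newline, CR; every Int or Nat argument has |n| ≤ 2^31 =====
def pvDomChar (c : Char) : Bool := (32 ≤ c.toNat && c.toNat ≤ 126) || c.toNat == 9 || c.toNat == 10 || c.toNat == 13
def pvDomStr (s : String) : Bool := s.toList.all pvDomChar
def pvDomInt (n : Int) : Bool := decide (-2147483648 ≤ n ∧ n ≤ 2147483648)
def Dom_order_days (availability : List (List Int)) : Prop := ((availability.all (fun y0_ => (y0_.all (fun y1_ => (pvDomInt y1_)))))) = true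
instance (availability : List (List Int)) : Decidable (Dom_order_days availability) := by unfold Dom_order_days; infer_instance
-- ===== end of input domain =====

-- B replaces A's sort-by-key with selection (repeatedly extract the minimum-key day) and rebuilds
-- rows directly from the resulting day order; objective: alternative algorithm, same result.

-- ===== PORT A =====
def calc_difficulty (availability : List (List Int)) (index : Int) : Int × Int :=
  (PySem.List.pyRange 0 (availability.length : Int) 1).foldl
    (fun acc p =>
      if PySem.List.pyGetD (PySem.List.pyGetD availability p []) index 0 ≠ 0 then
        (acc.1 + 1, acc.2 + p)
      else acc)
    (0, 0)

-- Python's 3-tuple sort is ported with PySem.List.sorted2 on the first two components: the third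
-- components of diff_tuples are 0,1,…,n-1 in increasing list order, so the stable 2-key sort is
-- exactly Python's lexicographic 3-tuple sort here.
def order_days (availability : List (List Int)) : List (List Int) × (List (Int × Int)) :=
  let n : Int := ((PySem.List.pyGetD availability 0 []).length : Int)
  let diff_tuples : List (Int × Int × Int) :=
    (PySem.List.pyRange 0 n 1).foldl
      (fun acc d =>
        let c := calc_difficulty availability d
        acc ++ [(c.1, c.2, d)]) []
  let sorted_tuples := PySem.List.sorted2 diff_tuples (fun t => t.1) (fun t => t.2.1)
  let orig_mapping : PySem.Dict Int Int :=
    (PySem.List.pyRange 0 (sorted_tuples.length : Int) 1).foldl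
      (fun m t => m.insert t (PySem.List.pyGetD sorted_tuples t (0, 0, 0)).2.2)
      PySem.Dict.empty
  let init : List (List Int) :=
    (PySem.List.pyRange 0 (availability.length : Int) 1).foldl
      (fun acc _ => acc ++ [([] : List Int)]) []
  let new_availability :=
    (PySem.List.pyRange 0 n 1).foldl
      (fun na d =>
        (PySem.List.pyRange 0 (availability.length : Int) 1).foldl
          (fun na p =>
            let orig_index := orig_mapping.getD d 0
            PySem.List.pySetD na p
              (PySem.List.pyGetD na p [] ++
                [PySem.List.pyGetD (PySem.List.pyGetD availability p []) orig_index 0]))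
          na)
      init
  (new_availability, orig_mapping.items)

-- ===== PORT B =====
-- Python's '<' on 3-tuples of ints: strict lexicographic comparison.
def pvLt3 (a b : Int × Int × Int) : Bool :=
  decide (a.1 < b.1) ||
    (decide (a.1 = b.1) &&
      (decide (a.2.1 < b.2.1) || (decide (a.2.1 = b.2.1) && decide (a.2.2 < b.2.2))))

-- min(keys): running minimum, an earlier element wins ties (CPython replaces only on '<').
def pvMin3 (x : Int × Int × Int) (t : List (Int × Int × Int)) : Int × Int × Int :=
  t.foldl (fun a b => if pvLt3 b a then b else a) x

-- the 'while keys:' loop; fuel = initial length makes the recursion total (each step removes one element)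
def selectLoop : Nat → List (Int × Int × Int) → List (Int × Int × Int)
  | 0, _ => []
  | _ + 1, [] => []
  | f + 1, x :: t =>
      let m := pvMin3 x t
      m :: selectLoop f ((PySem.List.remove? (x :: t) m).getD [])

def order_days_alt (availability : List (List Int)) : List (List Int) × (List (Int × Int)) :=
  let n : Int := ((PySem.List.pyGetD availability 0 []).length : Int)
  let keys : List (Int × Int × Int) :=
    (PySem.List.pyRange 0 n 1).foldl
      (fun acc d =>
        let c :=
          (PySem.List.enumerate availability 0).foldl
            (fun acc2 pr =>
              if PySem.List.pyGetD pr.2 d 0 ≠ 0 then (acc2.1 + 1, acc2.2 + pr.1) else acc2)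
            ((0 : Int), (0 : Int))
        acc ++ [(c.1, c.2, d)]) []
  let chosen := selectLoop keys.length keys
  let order := chosen.map (fun m => m.2.2)
  let orig_mapping : PySem.Dict Int Int :=
    (PySem.List.enumerate order 0).foldl (fun dd pr => dd.insert pr.1 pr.2) PySem.Dict.empty
  let new_availability :=
    availability.map (fun row => order.map (fun d => PySem.List.pyGetD row d 0))
  (new_availability, orig_mapping.items)

-- ===== PRECONDITION & SPEC =====
-- A raises IndexError on availability = [] (availability[0]) and whenever some row is shorter than
-- the first row (availability[p][index]); B raises on exactly these inputs too.
def Pre_order_days (availability : List (List Int)) : Prop :=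
  availability ≠ [] ∧
    ∀ row ∈ availability, (PySem.List.pyGetD availability 0 []).length ≤ row.length
instance (availability : List (List Int)) : Decidable (Pre_order_days availability) := by
  unfold Pre_order_days; infer_instance

def pvWitness_order_days : List (List Int) := [[1, 0], [0, 2]]

def Spec_order_days (availability : List (List Int)) (out : List (List Int) × (List (Int × Int))) : Prop := out = order_days_alt availability
instance (availability : List (List Int)) (out : List (List Int) × (List (Int × Int))) : Decidable (Spec_order_days availability out) := by unfold Spec_order_days; infer_instance

-- ===== CLAIM (what is proved, stated in full; the proofs are below) =====
def Claim_equal_order_days : Prop := ∀ (availability : List (List Int)), Dom_order_days availability → Pre_order_days availability → Spec_order_days availability (order_days availability)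

-- ===== LEMMAS AND PROOFS =====

-- ---- generic facts about the lexicographic comparison ----
lemma pv_lt3_irrefl (a : Int × Int × Int) : pvLt3 a a = false := by
  simp [pvLt3]

lemma pv_lt3_trans {a b c : Int × Int × Int} (h1 : pvLt3 a b = true) (h2 : pvLt3 b c = true) :
    pvLt3 a c = true := by
  obtain ⟨a1, a2, a3⟩ := a; obtain ⟨b1, b2, b3⟩ := b; obtain ⟨c1, c2, c3⟩ := c
  simp only [pvLt3, Bool.or_eq_true, Bool.and_eq_true, decide_eq_true_eq] at h1 h2 ⊢
  omega

lemma pv_lt3_conn {a b : Int × Int × Int} (h1 : pvLt3 a b = false) (h2 : pvLt3 b a = false) :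
    a = b := by
  obtain ⟨a1, a2, a3⟩ := a; obtain ⟨b1, b2, b3⟩ := b
  simp only [pvLt3, Bool.or_eq_false_iff, Bool.and_eq_false_iff, decide_eq_false_iff_not,
    not_lt] at h1 h2
  simp only [Prod.mk.injEq]
  omega

lemma pv_lt3_total {a b : Int × Int × Int} (h : pvLt3 a b = false) :
    a = b ∨ pvLt3 b a = true := by
  by_cases h2 : pvLt3 b a = true
  · exact Or.inr h2
  · exact Or.inl (pv_lt3_conn h (by simpa using h2))

-- ---- the running minimum is a member and a lower bound ----
lemma pv_min3_mem (t : List (Int × Int × Int)) : ∀ (x : Int × Int × Int),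
    pvMin3 x t = x ∨ pvMin3 x t ∈ t := by
  induction t with
  | nil => intro x; simp [pvMin3]
  | cons b t ih =>
    intro x
    have hstep : pvMin3 x (b :: t) = pvMin3 (if pvLt3 b x then b else x) t := rfl
    rw [hstep]
    rcases ih (if pvLt3 b x then b else x) with h | h
    · rw [h]
      by_cases hb : pvLt3 b x = true
      · rw [if_pos hb]; exact Or.inr List.mem_cons_self
      · rw [if_neg hb]; exact Or.inl rfl
    · exact Or.inr (List.mem_cons_of_mem _ h)

lemma pv_min3_le (t : List (Int × Int × Int)) : ∀ (x y : Int × Int × Int),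
    (y = x ∨ y ∈ t) → pvLt3 y (pvMin3 x t) = false := by
  induction t with
  | nil =>
    intro x y hy
    rcases hy with rfl | h
    · simpa [pvMin3] using pv_lt3_irrefl y
    · simp at h
  | cons b t ih =>
    intro x y hy
    have hstep : pvMin3 x (b :: t) = pvMin3 (if pvLt3 b x then b else x) t := rfl
    rw [hstep]
    by_cases hb : pvLt3 b x = true
    · rw [if_pos hb]
      rcases hy with rfl | hy
      · -- y = x : min ≤ b < x
        have hmin : pvLt3 b (pvMin3 b t) = false := ih b b (Or.inl rfl)
        by_cases hc : pvLt3 y (pvMin3 b t) = true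
        · -- x < min would give b < x < min contradicting min ≤ b
          have : pvLt3 b (pvMin3 b t) = true := pv_lt3_trans hb hc
          rw [this] at hmin; cases hmin
        · simpa using hc
      · rcases List.mem_cons.mp hy with rfl | hy
        · exact ih y y (Or.inl rfl)
        · exact ih b y (Or.inr hy)
    · rw [if_neg hb]
      have hb' : pvLt3 b x = false := by simpa using hb
      rcases hy with rfl | hy
      · exact ih y y (Or.inl rfl)
      · rcases List.mem_cons.mp hy with rfl | hy
        · -- y = b, ¬(b < x): either b = x or x < b; min ≤ x in both cases
          have hmin : pvLt3 x (pvMin3 x t) = false := ih x x (Or.inl rfl)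
          rcases pv_lt3_total hb' with rfl | hxb
          · exact hmin
          · by_cases hc : pvLt3 y (pvMin3 x t) = true
            · have : pvLt3 x (pvMin3 x t) = true := pv_lt3_trans hxb hc
              rw [this] at hmin; cases hmin
            · simpa using hc
        · exact ih x y (Or.inr hy)

-- ---- the selection loop returns a permutation, sorted (non-strictly) by pvLt3 ----
lemma pv_select_perm : ∀ (f : Nat) (ks : List (Int × Int × Int)), ks.length = f →
    (selectLoop f ks).Perm ks := by
  intro f
  induction f with
  | zero => intro ks h; rw [List.length_eq_zero_iff.mp h]; simp [selectLoop]
  | succ f ih =>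
    intro ks h
    match ks with
    | [] => simp at h
    | x :: t =>
      have hm : pvMin3 x t ∈ x :: t := by
        rcases pv_min3_mem t x with h' | h'
        · rw [h']; exact List.mem_cons_self
        · exact List.mem_cons_of_mem _ h'
      have hrem : PySem.List.remove? (x :: t) (pvMin3 x t) = some ((x :: t).erase (pvMin3 x t)) :=
        PySem.List.remove?_eq_some_erase _ _ hm
      have hlen : ((x :: t).erase (pvMin3 x t)).length = f := by
        rw [List.length_erase_of_mem hm]
        simpa using h
      show (pvMin3 x t :: selectLoop f ((PySem.List.remove? (x :: t) (pvMin3 x t)).getD [])).Perm (x :: t)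
      rw [hrem, Option.getD_some]
      exact ((ih _ hlen).cons (pvMin3 x t)).trans (List.perm_cons_erase hm).symm

lemma pv_select_sorted : ∀ (f : Nat) (ks : List (Int × Int × Int)), ks.length = f →
    (selectLoop f ks).Pairwise (fun a b => pvLt3 b a = false) := by
  intro f
  induction f with
  | zero => intro ks h; simp [selectLoop]
  | succ f ih =>
    intro ks h
    match ks with
    | [] => simp at h
    | x :: t =>
      have hm : pvMin3 x t ∈ x :: t := by
        rcases pv_min3_mem t x with h' | h'
        · rw [h']; exact List.mem_cons_self
        · exact List.mem_cons_of_mem _ h'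
      have hrem : PySem.List.remove? (x :: t) (pvMin3 x t) = some ((x :: t).erase (pvMin3 x t)) :=
        PySem.List.remove?_eq_some_erase _ _ hm
      have hlen : ((x :: t).erase (pvMin3 x t)).length = f := by
        rw [List.length_erase_of_mem hm]
        simpa using h
      show (pvMin3 x t :: selectLoop f ((PySem.List.remove? (x :: t) (pvMin3 x t)).getD [])).Pairwise _
      rw [hrem, Option.getD_some]
      refine List.Pairwise.cons ?_ (ih _ hlen)
      intro y hy
      have hy2 : y ∈ (x :: t).erase (pvMin3 x t) := (pv_select_perm f _ hlen).mem_iff.mp hy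
      have hy3 : y ∈ x :: t := List.mem_of_mem_erase hy2
      exact pv_min3_le t x y (List.mem_cons.mp hy3)

-- ---- insertion sort by pvLt3 ----
def pvInsSort3 (ks : List (Int × Int × Int)) : List (Int × Int × Int) :=
  ks.foldl (fun acc x => PySem.List.insertBy pvLt3 x acc) []

lemma pv_ins_perm_acc : ∀ (ks acc : List (Int × Int × Int)),
    (ks.foldl (fun acc x => PySem.List.insertBy pvLt3 x acc) acc).Perm (acc ++ ks) := by
  intro ks
  induction ks with
  | nil => intro acc; simp
  | cons x t ih =>
    intro acc
    rw [List.foldl_cons]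
    refine (ih _).trans ?_
    refine (((PySem.List.insertBy_perm pvLt3 x acc).append_right t).trans ?_)
    exact List.perm_middle.symm

lemma pv_insertBy_pairwise (x : Int × Int × Int) (ys : List (Int × Int × Int))
    (h : ys.Pairwise (fun a b => pvLt3 b a = false)) :
    (PySem.List.insertBy pvLt3 x ys).Pairwise (fun a b => pvLt3 b a = false) := by
  induction ys with
  | nil => simp [PySem.List.insertBy]
  | cons y ys ih =>
    rw [List.pairwise_cons] at h
    by_cases hb : pvLt3 x y = true
    · show (if pvLt3 x y = true then x :: y :: ys else _).Pairwise _
      rw [if_pos hb]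
      refine List.Pairwise.cons ?_ (List.pairwise_cons.mpr h)
      intro z hz
      rcases List.mem_cons.mp hz with rfl | hz
      · -- z = y : ¬ y < x from x < y (asymmetry via transitivity + irreflexivity)
        by_cases hc : pvLt3 z x = true
        · have := pv_lt3_trans hc hb; rw [pv_lt3_irrefl] at this; cases this
        · simpa using hc
      · -- z ∈ ys : y ≤ z and x < y give ¬ z < x
        have hyz : pvLt3 z y = false := h.1 z hz
        by_cases hc : pvLt3 z x = true
        · have : pvLt3 z y = true := pv_lt3_trans hc hb
          rw [this] at hyz; cases hyz
        · simpa using hc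
    · show (if pvLt3 x y = true then x :: y :: ys else y :: PySem.List.insertBy pvLt3 x ys).Pairwise _
      rw [if_neg hb]
      refine List.Pairwise.cons ?_ (ih h.2)
      intro z hz
      rcases (PySem.List.insertBy_mem_iff _ _ _ _).mp hz with rfl | hz
      · simpa using hb
      · exact h.1 z hz

lemma pv_ins_sorted_acc : ∀ (ks acc : List (Int × Int × Int)),
    acc.Pairwise (fun a b => pvLt3 b a = false) →
    (ks.foldl (fun acc x => PySem.List.insertBy pvLt3 x acc) acc).Pairwise
      (fun a b => pvLt3 b a = false) := by
  intro ks
  induction ks with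
  | nil => intro acc h; simpa using h
  | cons x t ih =>
    intro acc h
    rw [List.foldl_cons]
    exact ih _ (pv_insertBy_pairwise x acc h)

-- ---- uniqueness of the sorted arrangement ----
lemma pv_sorted_unique {L1 L2 : List (Int × Int × Int)} (hp : L1.Perm L2)
    (h1 : L1.Pairwise (fun a b => pvLt3 b a = false))
    (h2 : L2.Pairwise (fun a b => pvLt3 b a = false)) : L1 = L2 := by
  refine List.eq_of_perm_of_sorted ?_ h1 h2 hp
  intro a b _ _ hab hba
  exact pv_lt3_conn hba hab

-- ---- sorted2 on tuples with strictly increasing third components = insertion sort by pvLt3 ----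
lemma pv_insertBy_congr (before before' : (Int × Int × Int) → (Int × Int × Int) → Bool)
    (x : Int × Int × Int) : ∀ (ys : List (Int × Int × Int)),
    (∀ y ∈ ys, before x y = before' x y) →
    PySem.List.insertBy before x ys = PySem.List.insertBy before' x ys := by
  intro ys
  induction ys with
  | nil => intro _; rfl
  | cons y t ih =>
    intro h
    show (if before x y = true then x :: y :: t else y :: PySem.List.insertBy before x t)
      = (if before' x y = true then x :: y :: t else y :: PySem.List.insertBy before' x t)
    rw [h y List.mem_cons_self, ih (fun z hz => h z (List.mem_cons_of_mem _ hz))]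

def pvBefore2 (a b : Int × Int × Int) : Bool :=
  decide (a.1 < b.1) || (!decide (b.1 < a.1) && decide (a.2.1 < b.2.1))

lemma pv_before2_eq_lt3 {x y : Int × Int × Int} (h : y.2.2 < x.2.2) :
    pvBefore2 x y = pvLt3 x y := by
  obtain ⟨x1, x2, x3⟩ := x; obtain ⟨y1, y2, y3⟩ := y
  simp only at h
  rw [Bool.eq_iff_iff]
  simp only [pvBefore2, pvLt3, Bool.or_eq_true, Bool.and_eq_true, Bool.not_eq_true',
    decide_eq_true_eq, decide_eq_false_iff_not, not_lt]
  omega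

lemma pv_sorted2_fold : ∀ (K acc : List (Int × Int × Int)),
    (∀ y ∈ acc, ∀ x ∈ K, y.2.2 < x.2.2) →
    K.Pairwise (fun a b => a.2.2 < b.2.2) →
    K.foldl (fun acc x => PySem.List.insertBy pvBefore2 x acc) acc
      = K.foldl (fun acc x => PySem.List.insertBy pvLt3 x acc) acc := by
  intro K
  induction K with
  | nil => intro acc _ _; rfl
  | cons x t ih =>
    intro acc hacc hK
    rw [List.pairwise_cons] at hK
    rw [List.foldl_cons, List.foldl_cons]
    rw [pv_insertBy_congr pvBefore2 pvLt3 x acc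
      (fun y hy => pv_before2_eq_lt3 (hacc y hy x List.mem_cons_self))]
    apply ih
    · intro y hy z hz
      rcases (PySem.List.insertBy_mem_iff _ _ _ _).mp hy with rfl | hy
      · exact hK.1 z hz
      · exact hacc y hy z (List.mem_cons_of_mem _ hz)
    · exact hK.2

lemma pv_sorted2_eq_ins (K : List (Int × Int × Int))
    (hK : K.Pairwise (fun a b => a.2.2 < b.2.2)) :
    PySem.List.sorted2 K (fun t => t.1) (fun t => t.2.1) = pvInsSort3 K := by
  have h0 : PySem.List.sorted2 K (fun t => t.1) (fun t => t.2.1)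
      = K.foldl (fun acc x => PySem.List.insertBy pvBefore2 x acc) [] := by
    simp only [PySem.List.sorted2]
    rfl
  rw [h0, pvInsSort3]
  exact pv_sorted2_fold K [] (by intro y hy; simp at hy) hK

-- ---- the selection loop equals the sorted arrangement ----
lemma pv_select_eq_sorted2 (K : List (Int × Int × Int))
    (hK : K.Pairwise (fun a b => a.2.2 < b.2.2)) :
    selectLoop K.length K = PySem.List.sorted2 K (fun t => t.1) (fun t => t.2.1) := by
  rw [pv_sorted2_eq_ins K hK]
  exact pv_sorted_unique
    ((pv_select_perm K.length K rfl).trans (pv_ins_perm_acc K []).symm)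
    (pv_select_sorted K.length K rfl)
    (pv_ins_sorted_acc K [] (by simp))

-- ---- key computation: both key loops compute calc_difficulty ----
lemma pv_enumerate_map {α β : Type} (f : α → β) (xs : List α) : ∀ (s : Int),
    PySem.List.enumerate (xs.map f) s = (PySem.List.enumerate xs s).map (fun pr => (pr.1, f pr.2)) := by
  induction xs with
  | nil => intro s; simp [PySem.List.enumerate_nil]
  | cons x t ih => intro s; simp [PySem.List.enumerate_cons, ih]

lemma pv_calc_go (dd : Int) (av : List (List Int)) : ∀ (s a b : Int),
    (PySem.List.enumerate av s).foldl
      (fun acc pr => if PySem.List.pyGetD pr.2 dd 0 ≠ 0 then (acc.1 + 1, acc.2 + pr.1) else acc) (a, b)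
    = (a + (av.countP (fun r => PySem.List.pyGetD r dd 0 != 0) : Int),
       b + (((PySem.List.enumerate av s).filter (fun pr => PySem.List.pyGetD pr.2 dd 0 != 0)).map (fun pr => pr.1)).sum) := by
  induction av with
  | nil => intro s a b; simp [PySem.List.enumerate_nil]
  | cons r t ih =>
    intro s a b
    rw [PySem.List.enumerate_cons, List.foldl_cons]
    by_cases h : PySem.List.pyGetD r dd 0 = 0
    · have hstep : (if PySem.List.pyGetD (s, r).2 dd 0 ≠ 0 then (((a, b) : Int × Int).1 + 1, (a, b).2 + ((s, r) : Int × List Int).1) else (a, b)) = ((a, b) : Int × Int) := by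
        simp [h]
      rw [hstep, ih (s + 1) a b]
      simp [h]
    · have hstep : (if PySem.List.pyGetD (s, r).2 dd 0 ≠ 0 then (((a, b) : Int × Int).1 + 1, (a, b).2 + ((s, r) : Int × List Int).1) else (a, b)) = ((a + 1, b + s) : Int × Int) := by
        simp [h]
      rw [hstep, ih (s + 1) (a + 1) (b + s)]
      refine Prod.ext ?_ ?_ <;> simp [h] <;> ring

lemma pv_calc_eq (av : List (List Int)) (dd : Int) :
    calc_difficulty av dd =
      (PySem.List.enumerate av 0).foldl
        (fun acc2 pr => if PySem.List.pyGetD pr.2 dd 0 ≠ 0 then (acc2.1 + 1, acc2.2 + pr.1) else acc2)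
        ((0 : Int), (0 : Int)) := by
  unfold calc_difficulty
  have h1 := pv_calc_go dd av 0 0 0
  have h2 := pv_calc_go dd av 0 0 0
  conv at h1 => lhs; rw [PySem.List.enumerate_eq_map_pyRange av ([] : List Int), List.foldl_map]
  simp only [PySem.List.len] at h1
  rw [h2]
  exact h1

-- ---- A's diff_tuples loop and B's keys loop produce the same list pvKeys ----
def pvKeys (av : List (List Int)) : List (Int × Int × Int) :=
  (PySem.List.pyRange 0 ((PySem.List.pyGetD av 0 []).length : Int) 1).map
    (fun d => ((calc_difficulty av d).1, (calc_difficulty av d).2, d))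

lemma pv_triples_A (av : List (List Int)) :
    (PySem.List.pyRange 0 ((PySem.List.pyGetD av 0 []).length : Int) 1).foldl
        (fun acc d => acc ++ [((calc_difficulty av d).1, (calc_difficulty av d).2, d)]) []
      = pvKeys av := by
  rw [PySem.List.foldl_append_singleton_eq_map, pvKeys]
  simp

lemma pv_triples_B (av : List (List Int)) :
    (PySem.List.pyRange 0 ((PySem.List.pyGetD av 0 []).length : Int) 1).foldl
        (fun acc d =>
          let c :=
            (PySem.List.enumerate av 0).foldl
              (fun acc2 pr =>
                if PySem.List.pyGetD pr.2 d 0 ≠ 0 then (acc2.1 + 1, acc2.2 + pr.1) else acc2)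
              ((0 : Int), (0 : Int))
          acc ++ [(c.1, c.2, d)]) []
      = pvKeys av := by
  rw [PySem.List.foldl_append_singleton_eq_map, pvKeys]
  simp only [List.nil_append]
  apply List.map_congr_left
  intro d _
  rw [← pv_calc_eq]

lemma pv_keys_pairwise (av : List (List Int)) :
    (pvKeys av).Pairwise (fun a b => a.2.2 < b.2.2) := by
  rw [pvKeys]
  refine List.Pairwise.map _ ?_ (PySem.List.pairwise_lt_pyRange_one 0 _)
  intro a b h
  simpa using h

-- ---- A's orig_mapping dict ----
lemma pv_mapping_items (S : List (Int × Int × Int)) :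
    ((PySem.List.pyRange 0 (S.length : Int) 1).foldl
        (fun m t => m.insert t (PySem.List.pyGetD S t (0, 0, 0)).2.2) PySem.Dict.empty).items
      = (PySem.List.pyRange 0 (S.length : Int) 1).map
          (fun t => (t, (PySem.List.pyGetD S t (0, 0, 0)).2.2)) := by
  rw [PySem.Dict.items_foldl_insert_fresh (PySem.List.pyRange 0 (S.length : Int) 1)
        (fun t => t) (fun t => (PySem.List.pyGetD S t (0, 0, 0)).2.2) PySem.Dict.empty
        (fun a _ => PySem.Dict.contains_empty a)
        (by simpa using PySem.List.nodup_pyRange_one 0 (S.length : Int))]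
  simp [PySem.Dict.empty]

lemma pv_mapping_nodup (S : List (Int × Int × Int)) :
    ((PySem.List.pyRange 0 (S.length : Int) 1).foldl
        (fun m t => m.insert t (PySem.List.pyGetD S t (0, 0, 0)).2.2) PySem.Dict.empty).keys.Nodup := by
  exact PySem.Dict.nodup_keys_foldl_insert _ (fun _ t => (PySem.List.pyGetD S t (0, 0, 0)).2.2) _
    PySem.Dict.nodup_keys_empty

lemma pv_mapping_getD (S : List (Int × Int × Int)) (d : Int)
    (hd : d ∈ PySem.List.pyRange 0 (S.length : Int) 1) :
    ((PySem.List.pyRange 0 (S.length : Int) 1).foldl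
        (fun m t => m.insert t (PySem.List.pyGetD S t (0, 0, 0)).2.2) PySem.Dict.empty).getD d 0
      = (PySem.List.pyGetD S d (0, 0, 0)).2.2 := by
  apply PySem.Dict.getD_of_mem_items _ _ (pv_mapping_nodup S)
  rw [pv_mapping_items]
  exact List.mem_map.mpr ⟨d, hd, rfl⟩

lemma pv_map_eq_A (S : List (Int × Int × Int)) :
    ((PySem.List.pyRange 0 (S.length : Int) 1).foldl
        (fun m t => m.insert t (PySem.List.pyGetD S t (0, 0, 0)).2.2) PySem.Dict.empty).items
      = (PySem.List.enumerate S 0).map (fun tk => (tk.1, tk.2.2.2)) := by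
  rw [pv_mapping_items, PySem.List.enumerate_eq_map_pyRange S (0, 0, 0), List.map_map]
  simp [PySem.List.len]

-- ---- B's orig_mapping dict ----
lemma pv_map_eq_B (order : List Int) :
    ((PySem.List.enumerate order 0).foldl (fun dd pr => dd.insert pr.1 pr.2) PySem.Dict.empty).items
      = PySem.List.enumerate order 0 := by
  rw [PySem.Dict.items_foldl_insert_fresh (PySem.List.enumerate order 0)
        (fun pr => pr.1) (fun pr => pr.2) PySem.Dict.empty
        (fun a _ => PySem.Dict.contains_empty _)
        ?_]
  · simp [PySem.Dict.empty]
  · rw [PySem.List.enumerate_eq_map_pyRange order 0, List.map_map]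
    have := PySem.List.nodup_pyRange_one 0 (PySem.List.len order)
    simpa [Function.comp_def] using this

-- ---- A's reconstruction loops ----
lemma pv_inner (x : Int → Int) : ∀ (na pre : List (List Int)),
    (PySem.List.pyRange (pre.length : Int) ((pre.length : Int) + (na.length : Int)) 1).foldl
        (fun m p => PySem.List.pySetD m p (PySem.List.pyGetD m p [] ++ [x p])) (pre ++ na)
      = pre ++ (PySem.List.enumerate na (pre.length : Int)).map (fun pr => pr.2 ++ [x pr.1]) := by
  intro na
  induction na with
  | nil =>
    intro pre
    rw [PySem.List.pyRange_one_eq_nil (by simp), PySem.List.enumerate_nil]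
    simp
  | cons r t ih =>
    intro pre
    rw [PySem.List.pyRange_one_cons (by push_cast [List.length_cons]; omega), List.foldl_cons]
    have hget : PySem.List.pyGetD (pre ++ r :: t) (pre.length : Int) [] = r := by
      rw [PySem.List.pyGetD_natCast]
      simp [List.getD]
    have hset : PySem.List.pySetD (pre ++ r :: t) (pre.length : Int) (r ++ [x (pre.length : Int)])
        = (pre ++ [r ++ [x (pre.length : Int)]]) ++ t := by
      rw [PySem.List.pySetD_natCast]
      rw [List.set_append_right _ _ (le_refl pre.length)]
      simp
    rw [hget, hset]
    have hlen : ((pre ++ [r ++ [x (pre.length : Int)]]).length : Int) = (pre.length : Int) + 1 := by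
      simp
    have := ih (pre ++ [r ++ [x (pre.length : Int)]])
    rw [hlen] at this
    have harith : (pre.length : Int) + 1 + (t.length : Int) = (pre.length : Int) + ((r :: t).length : Int) := by
      push_cast [List.length_cons]; ring
    rw [harith] at this
    rw [this]
    rw [PySem.List.enumerate_cons]
    simp

lemma pv_inner_zero (x : Int → Int) (na : List (List Int)) :
    (PySem.List.pyRange 0 (na.length : Int) 1).foldl
        (fun m p => PySem.List.pySetD m p (PySem.List.pyGetD m p [] ++ [x p])) na
      = (PySem.List.enumerate na 0).map (fun pr => pr.2 ++ [x pr.1]) := by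
  have := pv_inner x na []
  simpa using this

lemma pv_inner_zero' (x : Int → Int) (na : List (List Int)) (L : Nat) (h : na.length = L) :
    (PySem.List.pyRange 0 (L : Int) 1).foldl
        (fun m p => PySem.List.pySetD m p (PySem.List.pyGetD m p [] ++ [x p])) na
      = (PySem.List.enumerate na 0).map (fun pr => pr.2 ++ [x pr.1]) := by
  subst h; exact pv_inner_zero x na

lemma pv_enum_map_pyRange {α : Type} (g : Int → α) (n : Nat) (d : α) :
    PySem.List.enumerate ((PySem.List.pyRange 0 (n : Int) 1).map g)
      = (PySem.List.pyRange 0 (n : Int) 1).map (fun j => (j, g j)) := by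
  rw [PySem.List.enumerate_eq_map_pyRange _ d]
  have hlen : PySem.List.len ((PySem.List.pyRange 0 (n : Int) 1).map g) = (n : Int) := by
    simp [PySem.List.len, PySem.List.length_pyRange_one]
  rw [hlen]
  apply List.map_congr_left
  intro j hj
  rcases PySem.List.mem_pyRange_one.mp hj with ⟨h0, h1⟩
  rw [PySem.List.pyGetD_map_pyRange_of_nonneg g (n : Int) j d h0 h1]

lemma pv_outer_step (L : Nat) (x : Int → Int) (g : Int → List Int) :
    (PySem.List.pyRange 0 (L : Int) 1).foldl
        (fun m p => PySem.List.pySetD m p (PySem.List.pyGetD m p [] ++ [x p]))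
        ((PySem.List.pyRange 0 (L : Int) 1).map g)
      = (PySem.List.pyRange 0 (L : Int) 1).map (fun p => g p ++ [x p]) := by
  rw [pv_inner_zero' x _ L (by simp [PySem.List.length_pyRange_one]), pv_enum_map_pyRange g L []]
  rw [List.map_map]
  rfl

lemma pv_outer (L : Nat) (x : Int → Int → Int) : ∀ (ds : List Int) (g : Int → List Int),
    ds.foldl
        (fun na d =>
          (PySem.List.pyRange 0 (L : Int) 1).foldl
            (fun m p => PySem.List.pySetD m p (PySem.List.pyGetD m p [] ++ [x d p])) na)
        ((PySem.List.pyRange 0 (L : Int) 1).map g)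
      = (PySem.List.pyRange 0 (L : Int) 1).map (fun p => g p ++ ds.map (fun d => x d p)) := by
  intro ds
  induction ds with
  | nil => intro g; simp
  | cons d ds ih =>
    intro g
    rw [List.foldl_cons, pv_outer_step L (x d) g, ih (fun p => g p ++ [x d p])]
    simp

lemma pv_new_eq_A (av : List (List Int)) (S : List (Int × Int × Int))
    (hlen : (S.length : Int) = ((PySem.List.pyGetD av 0 []).length : Int)) :
    (PySem.List.pyRange 0 ((PySem.List.pyGetD av 0 []).length : Int) 1).foldl
        (fun na d =>
          (PySem.List.pyRange 0 (av.length : Int) 1).foldl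
            (fun na2 p =>
              PySem.List.pySetD na2 p
                (PySem.List.pyGetD na2 p [] ++
                  [PySem.List.pyGetD (PySem.List.pyGetD av p [])
                    (((PySem.List.pyRange 0 (S.length : Int) 1).foldl
                        (fun m t => m.insert t (PySem.List.pyGetD S t (0, 0, 0)).2.2)
                        PySem.Dict.empty).getD d 0) 0]))
            na)
        ((PySem.List.pyRange 0 (av.length : Int) 1).foldl (fun acc _ => acc ++ [([] : List Int)]) [])
      =
    av.map (fun row => S.map (fun k => PySem.List.pyGetD row k.2.2 0)) := by
  rw [PySem.List.foldl_append_singleton_eq_map (f := fun _ => ([] : List Int))]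
  simp only [List.nil_append]
  have hstep : ∀ (na : List (List Int)) (d : Int),
      d ∈ PySem.List.pyRange 0 ((PySem.List.pyGetD av 0 []).length : Int) 1 →
      (PySem.List.pyRange 0 (av.length : Int) 1).foldl
        (fun na2 p =>
          PySem.List.pySetD na2 p
            (PySem.List.pyGetD na2 p [] ++
              [PySem.List.pyGetD (PySem.List.pyGetD av p [])
                (((PySem.List.pyRange 0 (S.length : Int) 1).foldl
                    (fun m t => m.insert t (PySem.List.pyGetD S t (0, 0, 0)).2.2)
                    PySem.Dict.empty).getD d 0) 0])) na
      = (PySem.List.pyRange 0 (av.length : Int) 1).foldl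
        (fun na2 p =>
          PySem.List.pySetD na2 p
            (PySem.List.pyGetD na2 p [] ++
              [PySem.List.pyGetD (PySem.List.pyGetD av p [])
                ((PySem.List.pyGetD S d (0, 0, 0)).2.2) 0])) na := by
    intro na d hd
    rw [pv_mapping_getD S d (by rw [hlen]; exact hd)]
  rw [PySem.List.foldl_congr_mem
        (PySem.List.pyRange 0 ((PySem.List.pyGetD av 0 []).length : Int) 1)
        (fun na d =>
          (PySem.List.pyRange 0 (av.length : Int) 1).foldl
            (fun na2 p =>
              PySem.List.pySetD na2 p
                (PySem.List.pyGetD na2 p [] ++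
                  [PySem.List.pyGetD (PySem.List.pyGetD av p [])
                    (((PySem.List.pyRange 0 (S.length : Int) 1).foldl
                        (fun m t => m.insert t (PySem.List.pyGetD S t (0, 0, 0)).2.2)
                        PySem.Dict.empty).getD d 0) 0])) na)
        (fun na d =>
          (PySem.List.pyRange 0 (av.length : Int) 1).foldl
            (fun na2 p =>
              PySem.List.pySetD na2 p
                (PySem.List.pyGetD na2 p [] ++
                  [PySem.List.pyGetD (PySem.List.pyGetD av p [])
                    ((PySem.List.pyGetD S d (0, 0, 0)).2.2) 0])) na)
        _ hstep]
  rw [pv_outer av.length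
        (fun d p => PySem.List.pyGetD (PySem.List.pyGetD av p [])
          ((PySem.List.pyGetD S d (0, 0, 0)).2.2) 0)
        (PySem.List.pyRange 0 ((PySem.List.pyGetD av 0 []).length : Int) 1)
        (fun _ => ([] : List Int))]
  simp only [List.nil_append]
  conv_rhs => rw [← PySem.List.map_pyGetD_pyRange_zero' av ([] : List Int)]
  rw [List.map_map]
  apply List.map_congr_left
  intro p _
  simp only [Function.comp]
  conv_rhs => rw [← PySem.List.map_pyGetD_pyRange_zero' S (0, 0, 0)]
  rw [List.map_map, ← hlen]
  rfl

-- ---- main equality ----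
lemma pv_main (av : List (List Int)) : order_days av = order_days_alt av := by
  simp only [order_days, order_days_alt]
  rw [pv_triples_A av, pv_triples_B av]
  have hsel : selectLoop (pvKeys av).length (pvKeys av)
      = PySem.List.sorted2 (pvKeys av) (fun t => t.1) (fun t => t.2.1) :=
    pv_select_eq_sorted2 (pvKeys av) (pv_keys_pairwise av)
  rw [hsel]
  set S := PySem.List.sorted2 (pvKeys av) (fun t => t.1) (fun t => t.2.1) with hS
  have hlen : (S.length : Int) = ((PySem.List.pyGetD av 0 []).length : Int) := by
    rw [hS, (PySem.List.sorted2_perm (pvKeys av) _ _ false).length_eq]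
    simp [pvKeys, PySem.List.length_pyRange_one]
  refine Prod.ext ?_ ?_
  · -- new_availability
    rw [pv_new_eq_A av S hlen]
    simp only [List.map_map]
    apply List.map_congr_left
    intro row _
    apply List.map_congr_left
    intro k _
    rfl
  · -- orig_mapping items
    rw [pv_map_eq_A S, pv_map_eq_B,
      pv_enumerate_map (fun m : Int × Int × Int => m.2.2) S 0]

-- ===== VERDICT (by name: the statement is the Claim_ definition above) =====
theorem order_days_spec : Claim_equal_order_days := by
  intro availability _ _
  unfold Spec_order_days
  exact pv_main availability
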